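-- pv_equiv track=rewrite | github.com/IvanKalug-QA/codewars | Mutate_My_Strings.py | mutate_my_strings
-- ===== SOURCE A (Python) =====
-- def mutate_my_strings(s1,s2):
--     result = []
--     s = [i for i in s1]
--     result.append(''.join(s))
--     for i in range(len(s1)):
--         if s[i] != s2[i]:
--             s[i] = s2[i]
--             result.append(''.join(s))
--     return '\n'.join(result) + '\n'
-- ===== SOURCE B (Python) =====
-- def mutate_my_strings(s1, s2):
--     snaps = [s1] + [s2[:i + 1] + s1[i + 1:]
--                     for i, (a, b) in enumerate(zip(s1, s2)) if a != b]
--     return '\n'.join(snaps) + '\n'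
-- ===== Notes on version B (the rewrite author's own statement) =====
-- stated objective: simpler
-- what changed: B drops A's mutable character list and running re-join of the whole list at every mutation: each snapshot is computed directly as the slice expression s2[:i+1] + s1[i+1:] in one comprehension over enumerate(zip(s1, s2)).
import Mathlib
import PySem

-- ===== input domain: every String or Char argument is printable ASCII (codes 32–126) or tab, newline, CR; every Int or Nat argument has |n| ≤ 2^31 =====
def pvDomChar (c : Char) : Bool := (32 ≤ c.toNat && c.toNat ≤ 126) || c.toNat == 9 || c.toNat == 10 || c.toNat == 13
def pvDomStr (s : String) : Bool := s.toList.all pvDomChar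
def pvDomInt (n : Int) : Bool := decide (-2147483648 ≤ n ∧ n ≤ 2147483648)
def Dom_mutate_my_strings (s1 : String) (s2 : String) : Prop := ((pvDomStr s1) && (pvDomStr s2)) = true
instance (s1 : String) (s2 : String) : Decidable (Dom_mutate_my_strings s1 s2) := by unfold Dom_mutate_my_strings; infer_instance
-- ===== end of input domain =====

-- B replaces A's mutate-a-char-list-and-rejoin loop by direct slice snapshots s2[:i+1] + s1[i+1:] in one comprehension (simpler).


-- ===== PORT A =====
-- Literal port of A: copy s1 into a mutable char list, append a snapshot of the
-- whole list after each in-place mutation, finally '\n'.join(result) + '\n'.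
-- range(len(s1)) has only nonnegative indices, so Nat indexing is exact;
-- s2[i] is [i]? — none is Python's IndexError, excluded by Pre_.
def mutate_my_strings (s1 : String) (s2 : String) : String :=
  let s0 := s1.toList
  let st := (List.range s0.length).foldl
    (fun (acc : List (List Char) × List Char) i =>
      match (s2.toList)[i]? with
      | none => acc   -- Python raises IndexError here; Pre_ excludes these inputs
      | some c =>
        if acc.2[i]? ≠ some c then
          let s' := acc.2.set i c
          (acc.1 ++ [s'], s')
        else acc)
    ([s0], s0)
  String.ofList (PySem.Chars.join ['\n'] st.1 ++ ['\n'])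

-- ===== PORT B =====
-- Literal port of B: snapshots [s1] + [s2[:i+1] + s1[i+1:] for i,(a,b) in enumerate(zip(s1,s2)) if a != b].
def mutate_my_strings_alt (s1 : String) (s2 : String) : String :=
  let l1 := s1.toList
  let l2 := s2.toList
  let snaps := l1 :: (PySem.List.enumerate (l1.zip l2)).filterMap
      (fun p => if p.2.1 ≠ p.2.2 then
          some (PySem.List.slice l2 none (some (p.1 + 1)) ++ PySem.List.slice l1 (some (p.1 + 1)) none)
        else none)
  String.ofList (PySem.Chars.join ['\n'] snaps ++ ['\n'])

-- ===== PRECONDITION & SPEC =====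
-- Pre_ excludes exactly the inputs where A raises IndexError: s2 shorter than s1.
def Pre_mutate_my_strings (s1 : String) (s2 : String) : Prop :=
  s1.toList.length ≤ s2.toList.length
instance (s1 : String) (s2 : String) : Decidable (Pre_mutate_my_strings s1 s2) := by
  unfold Pre_mutate_my_strings; infer_instance
def pvWitness_mutate_my_strings : String × String := ("abc", "axc")

def Spec_mutate_my_strings (s1 : String) (s2 : String) (out : String) : Prop := out = mutate_my_strings_alt s1 s2
instance (s1 : String) (s2 : String) (out : String) : Decidable (Spec_mutate_my_strings s1 s2 out) := by unfold Spec_mutate_my_strings; infer_instance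

-- ===== CLAIM (what is proved, stated in full; the proofs are below) =====
def Claim_equal_mutate_my_strings : Prop := ∀ (s1 : String) (s2 : String), Dom_mutate_my_strings s1 s2 → Pre_mutate_my_strings s1 s2 → Spec_mutate_my_strings s1 s2 (mutate_my_strings s1 s2)

-- ===== LEMMAS AND PROOFS =====

-- B's snapshot at differing index i, for Nat-indexed reasoning.
def pvSnap (l1 l2 : List Char) (i : Nat) : List Char :=
  l2.take (i + 1) ++ l1.drop (i + 1)

-- A's loop state after the first m indices, expressed in closed form.
def pvSnaps (l1 l2 : List Char) (m : Nat) : List (List Char) :=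
  (List.range m).filterMap
    (fun i => if l1[i]? ≠ l2[i]? then some (pvSnap l1 l2 i) else none)

theorem pvInvariant (l1 l2 : List Char) (h : l1.length ≤ l2.length) (m : Nat)
    (hm : m ≤ l1.length) :
    (List.range m).foldl
      (fun (acc : List (List Char) × List Char) i =>
        match l2[i]? with
        | none => acc
        | some c =>
          if acc.2[i]? ≠ some c then
            let s' := acc.2.set i c
            (acc.1 ++ [s'], s')
          else acc)
      ([l1], l1)
    = (l1 :: pvSnaps l1 l2 m, l2.take m ++ l1.drop m) := by
  induction m with
  | zero => simp [pvSnaps]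
  | succ m ih =>
    have hm' : m ≤ l1.length := Nat.le_of_succ_le hm
    have hmlt : m < l1.length := hm
    have hm2 : m < l2.length := Nat.lt_of_lt_of_le hmlt h
    rw [List.range_succ, List.foldl_append, ih hm']
    have hstate : (l2.take m ++ l1.drop m)[m]? = l1[m]? := by
      rw [List.getElem?_append_right (by simp [Nat.min_eq_left (le_of_lt hm2)])]
      simp [Nat.min_eq_left (le_of_lt hm2), List.getElem?_drop]
    have hl2 : l2[m]? = some l2[m] := List.getElem?_eq_getElem hm2
    have hl1 : l1[m]? = some l1[m] := List.getElem?_eq_getElem hmlt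
    have htake : l2.take (m + 1) = l2.take m ++ [l2[m]] := by
      rw [List.take_add_one, hl2]; rfl
    have hdrop : l1.drop m = l1[m] :: l1.drop (m + 1) :=
      List.drop_eq_getElem_cons hmlt
    simp only [List.foldl_cons, List.foldl_nil, hl2]
    rw [hstate]
    by_cases hne : l1[m]? = some l2[m]
    · have heq : l1[m] = l2[m] := Option.some.inj (hl1.symm.trans hne)
      rw [if_neg (not_not_intro hne)]
      have hstep : l2.take (m + 1) ++ l1.drop (m + 1) = l2.take m ++ l1.drop m := by
        rw [htake, hdrop, heq, List.append_assoc]; rfl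
      have hcond : ¬ l1[m]? ≠ l2[m]? := by rw [hl1, hl2, heq]; simp
      simp [pvSnaps, List.range_succ, List.filterMap_append, hcond, hstep]
    · have hcond : l1[m]? ≠ l2[m]? := by rw [hl2]; exact hne
      have hset : (l2.take m ++ l1.drop m).set m l2[m]
          = l2.take (m + 1) ++ l1.drop (m + 1) := by
        rw [List.set_append]
        simp only [List.length_take, Nat.min_eq_left (le_of_lt hm2), lt_irrefl,
          Nat.sub_self]
        rw [hdrop, htake]
        simp only [List.set_cons_zero, List.append_assoc, List.singleton_append]
        simp
      rw [if_pos hne, hset]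
      simp [pvSnaps, List.range_succ, List.filterMap_append, hcond, pvSnap]

-- PySem.List.enumerate unrolled to a range-indexed map.
theorem pvEnumerate_eq {α : Type} [Inhabited α] (xs : List α) (s : Int) :
    PySem.List.enumerate xs s
      = (List.range xs.length).map (fun (i : Nat) => (s + (i : Int), xs[i]!)) := by
  induction xs generalizing s with
  | nil => simp [PySem.List.enumerate_nil]
  | cons x xs ih =>
    rw [PySem.List.enumerate_cons, ih]
    rw [List.length_cons, List.range_succ_eq_map]
    simp only [List.map_cons, List.map_map]
    refine List.cons_eq_cons.mpr ⟨by simp, ?_⟩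
    refine List.map_congr_left (fun i _ => ?_)
    simp only [Function.comp_apply, List.getElem!_cons_succ]
    congr 1
    push_cast
    ring
theorem pvAltSnaps (l1 l2 : List Char) (h : l1.length ≤ l2.length) :
    (PySem.List.enumerate (l1.zip l2)).filterMap
      (fun p => if p.2.1 ≠ p.2.2 then
          some (PySem.List.slice l2 none (some (p.1 + 1)) ++ PySem.List.slice l1 (some (p.1 + 1)) none)
        else none)
    = pvSnaps l1 l2 l1.length := by
  rw [pvEnumerate_eq, List.filterMap_map]
  rw [List.length_zip, Nat.min_eq_left h]
  refine List.filterMap_congr (fun i hi => ?_)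
  have hi1 : i < l1.length := List.mem_range.mp hi
  have hi2 : i < l2.length := Nat.lt_of_lt_of_le hi1 h
  have hiz : i < (l1.zip l2).length := by
    rw [List.length_zip]; omega
  have hzip : (l1.zip l2)[i]! = (l1[i], l2[i]) := by
    rw [List.getElem!_eq_getElem?_getD, List.getElem?_eq_getElem hiz]
    simp [List.getElem_zip]
  have htonat : ((0 : Int) + (i : Int) + 1).toNat = i + 1 := by omega
  simp only [Function.comp_apply, hzip]
  rw [PySem.List.slice_to l2 (by omega), PySem.List.slice_from l1 (by omega), htonat]
  by_cases hc : l1[i] = l2[i]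
  · simp [hc, List.getElem?_eq_getElem hi1, List.getElem?_eq_getElem hi2]
  · simp [hc, pvSnap, List.getElem?_eq_getElem hi1, List.getElem?_eq_getElem hi2]

-- ===== VERDICT (by name: the statement is the Claim_ definition above) =====
theorem mutate_my_strings_spec : Claim_equal_mutate_my_strings := by
  intro s1 s2 _ hpre
  unfold Spec_mutate_my_strings mutate_my_strings mutate_my_strings_alt
  dsimp only
  rw [pvInvariant s1.toList s2.toList hpre s1.toList.length (le_refl _),
    pvAltSnaps s1.toList s2.toList hpre]
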